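-- pv_equiv track=rewrite | github.com/pypi-data/pypi-mirror-396 | packages/MEROAI/meroai-0.2.1.tar.gz/meroai-0.2.1/src/MEROAI/models/dpr/tokenization_dpr_fast.py | _get_best_spans
-- ===== SOURCE A (Python) =====
-- import collections
--
-- DPRSpanPrediction = collections.namedtuple(
--     "DPRSpanPrediction", ["span_score", "relevance_score", "doc_id", "start_index", "end_index", "text"]
-- )
--
-- def _get_best_spans(
--
--     start_logits: list[int],
--     end_logits: list[int],
--     max_answer_length: int,
--     top_spans: int,
-- ) -> list[DPRSpanPrediction]:
--     scores = []
--     for start_index, start_score in enumerate(start_logits):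
--         for answer_length, end_score in enumerate(end_logits[start_index : start_index + max_answer_length]):
--             scores.append(((start_index, start_index + answer_length), start_score + end_score))
--     scores = sorted(scores, key=lambda x: x[1], reverse=True)
--     chosen_span_intervals = []
--     for (start_index, end_index), score in scores:
--         assert start_index <= end_index, f"Wrong span indices: [{start_index}:{end_index}]"
--         length = end_index - start_index + 1
--         assert length <= max_answer_length, f"Span is too long: {length} > {max_answer_length}"
--         if any(
--             start_index <= prev_start_index <= prev_end_index <= end_index
--             or prev_start_index <= start_index <= end_index <= prev_end_index
--             for (prev_start_index, prev_end_index) in chosen_span_intervals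
--         ):
--             continue
--         chosen_span_intervals.append((start_index, end_index))
--         if len(chosen_span_intervals) == top_spans:
--             break
--     return chosen_span_intervals
-- ===== SOURCE B (Python) =====
-- def _get_best_spans(start_logits, end_logits, max_answer_length, top_spans):
--     alive = [
--         ((i, i + l), ss + es)
--         for i, ss in enumerate(start_logits)
--         for l, es in enumerate(end_logits[i : i + max_answer_length])
--     ]
--     chosen = []
--     while alive:
--         best = max(alive, key=lambda c: c[1])
--         chosen.append(best[0])
--         if len(chosen) == top_spans:
--             return chosen
--         bs, be = best[0]
--         alive = [
--             c
--             for c in alive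
--             if not (c[0][0] <= bs <= be <= c[0][1] or bs <= c[0][0] <= c[0][1] <= be)
--         ]
--     return chosen
-- ===== Notes on version B (the rewrite author's own statement) =====
-- stated objective: alternative
-- what changed: A sorts all candidate spans by score and makes one greedy pass over the sorted list, testing each span against every chosen interval; B never sorts: it keeps a pruned list of still-compatible candidates, repeatedly takes max(alive, key=score) (first maximal, matching the stable sort's tie-break), appends it, and filters out the candidates it overlaps, until top_spans are chosen or none remains.
import Mathlib
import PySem

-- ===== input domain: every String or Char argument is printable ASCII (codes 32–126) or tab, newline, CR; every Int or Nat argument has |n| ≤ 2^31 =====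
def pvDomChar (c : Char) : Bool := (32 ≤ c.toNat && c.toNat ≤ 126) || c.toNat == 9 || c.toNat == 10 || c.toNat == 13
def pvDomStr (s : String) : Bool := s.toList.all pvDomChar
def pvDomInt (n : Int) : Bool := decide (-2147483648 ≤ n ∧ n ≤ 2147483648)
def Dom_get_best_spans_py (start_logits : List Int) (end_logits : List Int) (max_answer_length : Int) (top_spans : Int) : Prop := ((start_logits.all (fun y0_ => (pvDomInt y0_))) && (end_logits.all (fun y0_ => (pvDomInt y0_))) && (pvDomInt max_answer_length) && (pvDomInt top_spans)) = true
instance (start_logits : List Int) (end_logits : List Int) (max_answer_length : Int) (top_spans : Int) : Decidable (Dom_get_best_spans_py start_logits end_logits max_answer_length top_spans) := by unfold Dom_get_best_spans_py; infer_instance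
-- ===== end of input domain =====

-- B replaces A's sort-then-greedy-scan by repeated max-selection over a pruned list of
-- still-compatible candidates (an alternative decomposition, same result; no speed claim).

-- ===== PORT A =====
-- A's greedy pass over the sorted candidate list: skip spans overlapping a chosen one,
-- append otherwise, break when len(chosen) == top_spans (checked after appending).
-- A's two asserts always hold on Pre_ (spans are generated with start ≤ end and
-- length ≤ max_answer_length there), so they are not re-checked here; the inputs on
-- which the second assert fires are exactly the ones Pre_ excludes.
def pvAGreedy (ts : Int) : List ((Int × Int) × Int) → List (Int × Int) → List (Int × Int)
  | [], chosen => chosen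
  | c :: rest, chosen =>
    if chosen.any (fun pr => decide ((c.1.1 ≤ pr.1 ∧ pr.1 ≤ pr.2 ∧ pr.2 ≤ c.1.2) ∨ (pr.1 ≤ c.1.1 ∧ c.1.1 ≤ c.1.2 ∧ c.1.2 ≤ pr.2))) then
      pvAGreedy ts rest chosen
    else
      let ch := chosen ++ [c.1]
      if PySem.List.len ch = ts then ch else pvAGreedy ts rest ch

def get_best_spans_py (start_logits : List Int) (end_logits : List Int) (max_answer_length : Int) (top_spans : Int) : List (Int × Int) :=
  let scores := (PySem.List.enumerate start_logits).foldl (fun acc p =>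
    (PySem.List.enumerate (PySem.List.slice end_logits (some p.1) (some (p.1 + max_answer_length)))).foldl
      (fun acc2 q => acc2 ++ [((p.1, p.1 + q.1), p.2 + q.2)]) acc) []
  let scores := PySem.List.sorted scores (fun x => x.2) true
  pvAGreedy top_spans scores []

-- ===== PORT B =====
-- B's 'while alive:' loop (max? alive = none exactly when alive = []); max(alive, key=...)
-- is PySem.List.max? (first maximal element); the fuel (|alive| + 1) only makes the loop
-- total: the picked candidate is filtered out of `alive` each round.
def pvBLoop (ts : Int) : Nat → List ((Int × Int) × Int) → List (Int × Int) → List (Int × Int)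
  | 0, _, chosen => chosen
  | fuel + 1, alive, chosen =>
    match PySem.List.max? alive (fun c => c.2) with
    | none => chosen
    | some best =>
      let ch := chosen ++ [best.1]
      if PySem.List.len ch = ts then ch
      else pvBLoop ts fuel (alive.filter (fun c =>
        !decide ((c.1.1 ≤ best.1.1 ∧ best.1.1 ≤ best.1.2 ∧ best.1.2 ≤ c.1.2) ∨
                 (best.1.1 ≤ c.1.1 ∧ c.1.1 ≤ c.1.2 ∧ c.1.2 ≤ best.1.2)))) ch

def get_best_spans_py_alt (start_logits : List Int) (end_logits : List Int) (max_answer_length : Int) (top_spans : Int) : List (Int × Int) :=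
  let alive := (PySem.List.enumerate start_logits).flatMap (fun p =>
    (PySem.List.enumerate (PySem.List.slice end_logits (some p.1) (some (p.1 + max_answer_length)))).map
      (fun q => ((p.1, p.1 + q.1), p.2 + q.2)))
  pvBLoop top_spans (alive.length + 1) alive []

-- ===== PRECONDITION & SPEC =====
-- Pre_ excludes exactly the inputs on which A raises AssertionError ("Span is too long"):
-- a negative max_answer_length makes the Python slice end_logits[i : i+max_answer_length]
-- count from the END, so candidates longer than max_answer_length are generated whenever
-- start_logits is nonempty and len(end_logits) + max_answer_length > 0.
def Pre_get_best_spans_py (start_logits : List Int) (end_logits : List Int) (max_answer_length : Int) (top_spans : Int) : Prop :=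
  ¬ (max_answer_length < 0 ∧ start_logits ≠ [] ∧ 0 < (end_logits.length : Int) + max_answer_length)
instance (start_logits : List Int) (end_logits : List Int) (max_answer_length : Int) (top_spans : Int) : Decidable (Pre_get_best_spans_py start_logits end_logits max_answer_length top_spans) := by unfold Pre_get_best_spans_py; infer_instance
def pvWitness_get_best_spans_py : List Int × List Int × Int × Int := ([3, 1], [2, 4], 2, 1)

def Spec_get_best_spans_py (start_logits : List Int) (end_logits : List Int) (max_answer_length : Int) (top_spans : Int) (out : List (Int × Int)) : Prop := out = get_best_spans_py_alt start_logits end_logits max_answer_length top_spans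
instance (start_logits : List Int) (end_logits : List Int) (max_answer_length : Int) (top_spans : Int) (out : List (Int × Int)) : Decidable (Spec_get_best_spans_py start_logits end_logits max_answer_length top_spans out) := by unfold Spec_get_best_spans_py; infer_instance

-- ===== CLAIM (what is proved, stated in full; the proofs are below) =====
def Claim_equal_get_best_spans_py : Prop := ∀ (start_logits : List Int) (end_logits : List Int) (max_answer_length : Int) (top_spans : Int), Dom_get_best_spans_py start_logits end_logits max_answer_length top_spans → Pre_get_best_spans_py start_logits end_logits max_answer_length top_spans → Spec_get_best_spans_py start_logits end_logits max_answer_length top_spans (get_best_spans_py start_logits end_logits max_answer_length top_spans)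

-- ===== LEMMAS AND PROOFS =====

-- proof-side only: B's conflict test against a whole chosen list, and A-style
-- one-pass best-compatible selection over the unfiltered candidate list
def pvConflicts (s e : Int) (chosen : List (Int × Int)) : Bool :=
  chosen.any (fun pr => decide ((s ≤ pr.1 ∧ pr.1 ≤ pr.2 ∧ pr.2 ≤ e) ∨ (pr.1 ≤ s ∧ s ≤ e ∧ e ≤ pr.2)))

def pvBest (cands : List ((Int × Int) × Int)) (chosen : List (Int × Int)) : Option ((Int × Int) × Int) :=
  cands.foldl (fun best c =>
    if pvConflicts c.1.1 c.1.2 chosen then best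
    else match best with
      | none => some c
      | some b => if b.2 < c.2 then some c else best) none

def pvP (chosen : List (Int × Int)) (c : (Int × Int) × Int) : Bool :=
  !(pvConflicts c.1.1 c.1.2 chosen)

lemma pvMaxFilter_eq_pvBest (cands : List ((Int × Int) × Int)) (chosen : List (Int × Int)) :
    PySem.List.max? (cands.filter (pvP chosen)) (fun c => c.2) = pvBest cands chosen := by
  unfold PySem.List.max? pvBest
  rw [List.foldl_filter]
  congr 1
  funext best c
  by_cases hc : pvConflicts c.1.1 c.1.2 chosen <;> cases best <;> simp [pvP, hc]

lemma filter_pvP_append (cands : List ((Int × Int) × Int)) (chosen : List (Int × Int))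
    (c : (Int × Int) × Int) :
    (cands.filter (pvP chosen)).filter (fun c' =>
        !decide ((c'.1.1 ≤ c.1.1 ∧ c.1.1 ≤ c.1.2 ∧ c.1.2 ≤ c'.1.2) ∨
                 (c.1.1 ≤ c'.1.1 ∧ c'.1.1 ≤ c'.1.2 ∧ c'.1.2 ≤ c.1.2))) =
      cands.filter (pvP (chosen ++ [c.1])) := by
  rw [List.filter_filter]
  apply List.filter_congr
  intro c' _
  have h1 : pvConflicts c'.1.1 c'.1.2 (chosen ++ [c.1]) =
      (pvConflicts c'.1.1 c'.1.2 chosen ||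
        decide ((c'.1.1 ≤ c.1.1 ∧ c.1.1 ≤ c.1.2 ∧ c.1.2 ≤ c'.1.2) ∨
                (c.1.1 ≤ c'.1.1 ∧ c'.1.1 ≤ c'.1.2 ∧ c'.1.2 ≤ c.1.2))) := by
    simp [pvConflicts, List.any_append]
  simp [pvP, h1, Bool.not_or, Bool.and_comm]

lemma find?_insertBy_sorted {α : Type} (key : α → Int) (p : α → Bool) (x : α) (S : List α)
    (hS : S.Pairwise (fun a b => key b ≤ key a)) :
    (PySem.List.insertBy (fun a b => decide (key b < key a)) x S).find? p =
      match S.find? p with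
      | none => if p x then some x else none
      | some y => if p x ∧ key y < key x then some x else some y := by
  induction S with
  | nil =>
    simp only [PySem.List.insertBy, List.find?_nil, List.find?_cons]
    cases hpx : p x <;> simp [hpx]
  | cons h t ih =>
    have hht : ∀ y ∈ t, key y ≤ key h := (List.pairwise_cons.mp hS).1
    have htp : t.Pairwise (fun a b => key b ≤ key a) := (List.pairwise_cons.mp hS).2
    by_cases hx : key h < key x
    · rw [show PySem.List.insertBy (fun a b => decide (key b < key a)) x (h :: t) = x :: h :: t by
        simp [PySem.List.insertBy, hx]]
      by_cases hpx : p x = true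
      · rw [List.find?_cons_of_pos hpx]
        cases hf : (h :: t).find? p with
        | none => simp [hpx]
        | some y =>
          have : y ∈ h :: t := List.mem_of_find?_eq_some hf
          have : key y < key x := by
            rcases this with _ | hmem
            · exact hx
            · exact lt_of_le_of_lt (hht _ (by assumption)) hx
          simp [hpx, this]
      · rw [List.find?_cons_of_neg (by simp [hpx])]
        cases hf : (h :: t).find? p <;> simp [hpx]
    · rw [show PySem.List.insertBy (fun a b => decide (key b < key a)) x (h :: t) =
          h :: PySem.List.insertBy (fun a b => decide (key b < key a)) x t by
        simp [PySem.List.insertBy, hx]]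
      simp only [List.find?_cons]
      cases hph : p h with
      | true =>
        have : ¬ (p x = true ∧ key h < key x) := by tauto
        simp [this]
      | false =>
        rw [ih htp]

lemma sorted_append_singleton {α : Type} (key : α → Int) (pref : List α) (x : α) :
    PySem.List.sorted (pref ++ [x]) key true =
      PySem.List.insertBy (fun a b => decide (key b < key a)) x (PySem.List.sorted pref key true) := by
  rw [PySem.List.sorted_rev_eq_foldl_insertBy, PySem.List.sorted_rev_eq_foldl_insertBy,
    List.foldl_append]
  rfl

lemma pvBest_gen (chosen : List (Int × Int)) :
    ∀ (cs pref : List ((Int × Int) × Int)),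
    cs.foldl (fun best c =>
      if pvConflicts c.1.1 c.1.2 chosen then best
      else match best with
        | none => some c
        | some b => if b.2 < c.2 then some c else best)
      ((PySem.List.sorted pref (fun x => x.2) true).find? (pvP chosen)) =
    (PySem.List.sorted (pref ++ cs) (fun x => x.2) true).find? (pvP chosen) := by
  intro cs
  induction cs with
  | nil => intro pref; simp
  | cons x cs ih =>
    intro pref
    rw [List.foldl_cons]
    have hstep :
        (if pvConflicts x.1.1 x.1.2 chosen then ((PySem.List.sorted pref (fun x => x.2) true).find? (pvP chosen))
         else match ((PySem.List.sorted pref (fun x => x.2) true).find? (pvP chosen)) with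
           | none => some x
           | some b => if b.2 < x.2 then some x
                       else ((PySem.List.sorted pref (fun x => x.2) true).find? (pvP chosen))) =
        (PySem.List.sorted (pref ++ [x]) (fun x => x.2) true).find? (pvP chosen) := by
      rw [sorted_append_singleton,
        find?_insertBy_sorted (fun c => c.2) (pvP chosen) x _ (PySem.List.sorted_pairwise_rev _ _)]
      have hpx : pvP chosen x = !pvConflicts x.1.1 x.1.2 chosen := rfl
      cases hf : ((PySem.List.sorted pref (fun x => x.2) true).find? (pvP chosen)) with
      | none =>
        cases hc : pvConflicts x.1.1 x.1.2 chosen <;> simp [hpx, hc]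
      | some b =>
        cases hc : pvConflicts x.1.1 x.1.2 chosen with
        | true => simp [hpx, hc]
        | false =>
          by_cases hlt : b.2 < x.2 <;> simp [hpx, hc, hlt]
    rw [hstep, ih (pref ++ [x]), List.append_assoc]
    rfl

lemma pvBest_eq_find? (cands : List ((Int × Int) × Int)) (chosen : List (Int × Int)) :
    pvBest cands chosen = (PySem.List.sorted cands (fun x => x.2) true).find? (pvP chosen) := by
  have := pvBest_gen chosen cands []
  simpa [pvBest] using this

lemma pvConflicts_append_mono (s e : Int) (chosen : List (Int × Int)) (i : Int × Int)
    (h : pvConflicts s e chosen = true) : pvConflicts s e (chosen ++ [i]) = true := by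
  simp only [pvConflicts, List.any_append, Bool.or_eq_true]
  exact Or.inl h

lemma pvConflicts_self (s e : Int) (chosen : List (Int × Int)) (hse : s ≤ e) :
    pvConflicts s e (chosen ++ [(s, e)]) = true := by
  simp only [pvConflicts, List.any_append, Bool.or_eq_true]
  refine Or.inr ?_
  simp
  omega

lemma pvLoop_eq (cands : List ((Int × Int) × Int)) (ts : Int)
    (hshape : ∀ c ∈ cands, c.1.1 ≤ c.1.2) :
    ∀ (rest pre : List ((Int × Int) × Int)) (chosen : List (Int × Int)) (fuel : Nat),
    PySem.List.sorted cands (fun x => x.2) true = pre ++ rest →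
    (∀ c ∈ pre, pvConflicts c.1.1 c.1.2 chosen = true) →
    rest.length < fuel →
    pvAGreedy ts rest chosen = pvBLoop ts fuel (cands.filter (pvP chosen)) chosen := by
  intro rest
  induction rest with
  | nil =>
    intro pre chosen fuel hsplit hpre hfuel
    obtain ⟨f, rfl⟩ : ∃ f, fuel = f + 1 := ⟨fuel - 1, by omega⟩
    have hnone : PySem.List.max? (cands.filter (pvP chosen)) (fun c => c.2) = none := by
      rw [pvMaxFilter_eq_pvBest]
      rw [pvBest_eq_find?, hsplit]
      exact List.find?_eq_none.mpr (by
        intro c hc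
        simp only [List.append_nil] at hc
        simp [pvP, hpre c hc])
    simp [pvAGreedy, pvBLoop, hnone]
  | cons c rest ih =>
    intro pre chosen fuel hsplit hpre hfuel
    obtain ⟨f, rfl⟩ : ∃ f, fuel = f + 1 := ⟨fuel - 1, by omega⟩
    have hcmem : c ∈ cands := by
      rw [← PySem.List.mem_sorted cands (fun x => x.2) true, hsplit]
      simp
    by_cases hc : pvConflicts c.1.1 c.1.2 chosen = true
    · rw [show pvAGreedy ts (c :: rest) chosen = pvAGreedy ts rest chosen by
        simp only [pvAGreedy, pvConflicts] at hc ⊢; rw [if_pos hc]]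
      exact ih (pre ++ [c]) chosen (f + 1)
        (by rw [hsplit, List.append_assoc]; rfl)
        (by intro c' hc'
            rcases List.mem_append.mp hc' with h | h
            · exact hpre c' h
            · simp at h; subst h; exact hc)
        (by simp at hfuel ⊢; omega)
    · have hfind : PySem.List.max? (cands.filter (pvP chosen)) (fun c => c.2) = some c := by
        rw [pvMaxFilter_eq_pvBest]
        rw [pvBest_eq_find?, hsplit, List.find?_append,
          List.find?_eq_none.mpr (fun c' h => by simp [pvP, hpre c' h])]
        simp [pvP, hc]
      have hb : pvBLoop ts (f + 1) (cands.filter (pvP chosen)) chosen =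
          (if PySem.List.len (chosen ++ [c.1]) = ts then chosen ++ [c.1]
           else pvBLoop ts f (cands.filter (pvP (chosen ++ [c.1]))) (chosen ++ [c.1])) := by
        simp only [pvBLoop, hfind, filter_pvP_append]
      rw [hb, show pvAGreedy ts (c :: rest) chosen =
          (if PySem.List.len (chosen ++ [c.1]) = ts then chosen ++ [c.1]
           else pvAGreedy ts rest (chosen ++ [c.1])) by
        simp only [pvAGreedy, pvConflicts] at hc ⊢; rw [if_neg hc]]
      by_cases hts : PySem.List.len (chosen ++ [c.1]) = ts
      · rw [if_pos hts, if_pos hts]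
      · rw [if_neg hts, if_neg hts]
        exact ih (pre ++ [c]) (chosen ++ [c.1]) f
          (by rw [hsplit, List.append_assoc]; rfl)
          (by intro c' hc'
              rcases List.mem_append.mp hc' with h | h
              · exact pvConflicts_append_mono _ _ _ _ (hpre c' h)
              · have hse : c.1.1 ≤ c.1.2 := hshape c hcmem
                simp at h; rw [h]
                simpa using pvConflicts_self _ _ chosen hse)
          (by simp at hfuel ⊢; omega)

lemma scores_eq_candidates (start_logits end_logits : List Int) (max_answer_length : Int) :
    (PySem.List.enumerate start_logits).foldl (fun acc p =>
      (PySem.List.enumerate (PySem.List.slice end_logits (some p.1) (some (p.1 + max_answer_length)))).foldl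
        (fun acc2 q => acc2 ++ [((p.1, p.1 + q.1), p.2 + q.2)]) acc) [] =
    (PySem.List.enumerate start_logits).flatMap (fun p =>
      (PySem.List.enumerate (PySem.List.slice end_logits (some p.1) (some (p.1 + max_answer_length)))).map
        (fun q => ((p.1, p.1 + q.1), p.2 + q.2))) := by
  simp only [PySem.List.foldl_append_singleton_eq_map]
  rw [PySem.List.foldl_append_eq_flatMap]
  rw [List.nil_append]

lemma candidates_shape (start_logits end_logits : List Int) (max_answer_length : Int) :
    ∀ c ∈ (PySem.List.enumerate start_logits).flatMap (fun p =>
      (PySem.List.enumerate (PySem.List.slice end_logits (some p.1) (some (p.1 + max_answer_length)))).map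
        (fun q => ((p.1, p.1 + q.1), p.2 + q.2))), c.1.1 ≤ c.1.2 := by
  intro c hc
  rcases List.mem_flatMap.mp hc with ⟨p, hp, hmem⟩
  rcases List.mem_map.mp hmem with ⟨q, hq, rfl⟩
  rcases (PySem.List.mem_enumerate_iff _ _ _).mp hq with ⟨k, hk, rfl⟩
  simp

lemma ports_agree (start_logits end_logits : List Int) (max_answer_length top_spans : Int) :
    get_best_spans_py start_logits end_logits max_answer_length top_spans =
    get_best_spans_py_alt start_logits end_logits max_answer_length top_spans := by
  unfold get_best_spans_py get_best_spans_py_alt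
  rw [scores_eq_candidates]
  have hfull : ∀ (l : List ((Int × Int) × Int)), l.filter (pvP []) = l := by
    intro l
    exact List.filter_eq_self.mpr (by intro a _; simp [pvP, pvConflicts])
  set C := (PySem.List.enumerate start_logits).flatMap (fun p =>
    (PySem.List.enumerate (PySem.List.slice end_logits (some p.1) (some (p.1 + max_answer_length)))).map
      (fun q => ((p.1, p.1 + q.1), p.2 + q.2))) with hC
  show pvAGreedy top_spans (PySem.List.sorted C (fun x => x.2) true) [] =
    pvBLoop top_spans (C.length + 1) C []
  conv_rhs => rw [← hfull C]
  exact pvLoop_eq C top_spans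
    (candidates_shape start_logits end_logits max_answer_length)
    (PySem.List.sorted C (fun x => x.2) true) [] [] ((C.filter (pvP [])).length + 1)
    rfl (by simp) (by rw [PySem.List.length_sorted, hfull]; omega)

-- ===== VERDICT (by name: the statement is the Claim_ definition above) =====
theorem get_best_spans_py_spec : Claim_equal_get_best_spans_py := by
  intro start_logits end_logits max_answer_length top_spans _ _
  unfold Spec_get_best_spans_py
  exact ports_agree start_logits end_logits max_answer_length top_spans
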